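-- pv_equiv track=rewrite | github.com/khuonggminhhoang/PYTHON_PTIT | dem_cap_dong_xu_PY02038.py | cnt_row
-- ===== SOURCE A (Python) =====
-- def cnt_row(lst, n):
--     ans = 0
--     for sub in lst:
--         cnt = 0
--         for c in sub:
--             if c == 'C':
--                 cnt += 1
--         ans += cnt * (cnt - 1)//2
--     return ans
-- ===== SOURCE B (Python) =====
-- def cnt_row(lst, n):
--     ans = 0
--     for sub in lst:
--         seen = 0
--         for c in sub:
--             if c == 'C':
--                 ans += seen
--                 seen += 1
--     return ans
-- ===== Notes on version B (the rewrite author's own statement) =====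
-- stated objective: alternative
-- what changed: Counts pairs incrementally: each new 'C' adds the number of earlier 'C's in the row to the answer, replacing the per-row count followed by the closed-form binomial cnt*(cnt-1)//2.
import Mathlib
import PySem

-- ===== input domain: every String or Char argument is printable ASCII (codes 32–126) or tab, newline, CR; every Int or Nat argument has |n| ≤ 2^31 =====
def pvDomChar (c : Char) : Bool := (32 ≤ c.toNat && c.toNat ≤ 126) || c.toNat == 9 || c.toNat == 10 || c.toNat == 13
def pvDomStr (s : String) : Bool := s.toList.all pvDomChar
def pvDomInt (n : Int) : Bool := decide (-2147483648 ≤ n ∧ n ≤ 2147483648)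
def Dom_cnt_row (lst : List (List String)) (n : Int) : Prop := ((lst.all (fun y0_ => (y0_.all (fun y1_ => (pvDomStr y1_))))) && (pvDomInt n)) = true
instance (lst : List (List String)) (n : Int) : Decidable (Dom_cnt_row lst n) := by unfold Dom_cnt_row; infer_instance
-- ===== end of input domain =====

-- B replaces A's per-row count + closed-form binomial by an incremental pair count (each 'C' pairs with all earlier 'C's in its row); same cost, alternative algorithm.

-- ===== PORT A =====
def cnt_row (lst : List (List String)) (n : Int) : Int :=
  lst.foldl (fun ans sub =>
    let cnt : Int := sub.foldl (fun cnt c => if c = "C" then cnt + 1 else cnt) 0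
    ans + PySem.Int.floordiv (cnt * (cnt - 1)) 2) 0

-- ===== PORT B =====
def cnt_row_alt (lst : List (List String)) (n : Int) : Int :=
  (lst.foldl (fun ans sub =>
    (sub.foldl (fun (p : Int × Int) c =>
      if c = "C" then (p.1 + p.2, p.2 + 1) else p) (ans, 0)).1) 0)

-- ===== PRECONDITION & SPEC =====
def Spec_cnt_row (lst : List (List String)) (n : Int) (out : Int) : Prop := out = cnt_row_alt lst n
instance (lst : List (List String)) (n : Int) (out : Int) : Decidable (Spec_cnt_row lst n out) := by unfold Spec_cnt_row; infer_instance

-- ===== CLAIM (what is proved, stated in full; the proofs are below) =====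
def Claim_equal_cnt_row : Prop := ∀ (lst : List (List String)) (n : Int), Dom_cnt_row lst n → Spec_cnt_row lst n (cnt_row lst n)

-- ===== LEMMAS AND PROOFS =====

theorem cnt_shift (t : List String) (i : Int) :
    t.foldl (fun cnt c => if c = "C" then cnt + 1 else cnt) i
      = i + t.foldl (fun cnt c => if c = "C" then cnt + 1 else cnt) 0 := by
  induction t generalizing i with
  | nil => simp
  | cons d u ihu =>
    simp only [List.foldl_cons]
    by_cases hd : d = "C"
    · simp only [hd, reduceIte]
      rw [ihu (i + 1), ihu (0 + 1)]; ring
    · simp only [if_neg hd]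
      exact ihu i

/-- B's inner fold from (a, s): second component, and twice the first component,
    expressed through A's count k. -/
theorem inner_fold (sub : List String) (a s : Int) :
    ((sub.foldl (fun (p : Int × Int) c =>
        if c = "C" then (p.1 + p.2, p.2 + 1) else p) (a, s)).2
      = s + sub.foldl (fun cnt c => if c = "C" then cnt + 1 else cnt) 0)
    ∧ (2 * (sub.foldl (fun (p : Int × Int) c =>
        if c = "C" then (p.1 + p.2, p.2 + 1) else p) (a, s)).1
      = 2 * a + (sub.foldl (fun cnt c => if c = "C" then cnt + 1 else cnt) 0)
          * (2 * s + (sub.foldl (fun cnt c => if c = "C" then cnt + 1 else cnt) 0) - 1)) := by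
  induction sub generalizing a s with
  | nil => simp
  | cons c t ih =>
    simp only [List.foldl_cons]
    by_cases h : c = "C"
    · simp only [h, reduceIte]
      obtain ⟨h1, h2⟩ := ih (a + s) (s + 1)
      rw [cnt_shift t (0 + 1)]
      exact ⟨by rw [h1]; ring, by rw [h2]; ring⟩
    · simp only [if_neg h]
      exact ih a s

theorem row_eq (sub : List String) (a : Int) :
    a + PySem.Int.floordiv
        ((sub.foldl (fun cnt c => if c = "C" then cnt + 1 else cnt) 0)
          * ((sub.foldl (fun cnt c => if c = "C" then cnt + 1 else cnt) 0) - 1)) 2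
    = (sub.foldl (fun (p : Int × Int) c =>
        if c = "C" then (p.1 + p.2, p.2 + 1) else p) (a, 0)).1 := by
  obtain ⟨-, h2⟩ := inner_fold sub a 0
  set k : Int := sub.foldl (fun cnt c => if c = "C" then cnt + 1 else cnt) 0 with hk
  set F : Int := (sub.foldl (fun (p : Int × Int) c =>
      if c = "C" then (p.1 + p.2, p.2 + 1) else p) (a, 0)).1 with hF
  have hm : k * (k - 1) = 2 * (F - a) := by nlinarith [h2]
  rw [hm, PySem.Int.floordiv_eq_ediv_of_pos (by omega)]
  omega

theorem cnt_row_eq (lst : List (List String)) (a : Int) :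
    lst.foldl (fun ans sub =>
      let cnt : Int := sub.foldl (fun cnt c => if c = "C" then cnt + 1 else cnt) 0
      ans + PySem.Int.floordiv (cnt * (cnt - 1)) 2) a
    = lst.foldl (fun ans sub =>
      (sub.foldl (fun (p : Int × Int) c =>
        if c = "C" then (p.1 + p.2, p.2 + 1) else p) (ans, 0)).1) a := by
  induction lst generalizing a with
  | nil => rfl
  | cons sub t ih =>
    simp only [List.foldl_cons]
    rw [row_eq sub a]
    exact ih _

-- ===== VERDICT (by name: the statement is the Claim_ definition above) =====
theorem cnt_row_spec : Claim_equal_cnt_row := by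
  intro lst n _
  unfold Spec_cnt_row cnt_row cnt_row_alt
  exact cnt_row_eq lst 0
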